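-- pv_equiv track=rewrite | github.com/banana-galaxy/challenges | challenge1/maxdn.py | solution
-- ===== SOURCE A (Python) =====
-- def solution(img, factor=64):
--         result = [[0 for x in range(len(img)*factor)] for i in range(len(img)*factor)]
--
--         for i in range(len(img)):
--                 for j in range(len(img)):
--                         for a in range(factor):
--                                 for b in range(factor):
--                                         result[(i * factor) + a][(j * factor)+ b] = img[i][j]
--
--         return result
-- ===== SOURCE B (Python) =====
-- def solution(img, factor=64):
--     n = len(img)
--     result = []
--     for i in range(n):
--         expanded = [img[i][j] for j in range(n) for _ in range(factor)]
--         for _ in range(factor):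
--             result.append(list(expanded))
--     return result
-- ===== Notes on version B (the rewrite author's own statement) =====
-- stated objective: simpler
-- what changed: B builds each expanded row once and appends factor independent copies of it, instead of preallocating an n*factor square of zeros and writing every cell through four nested index loops.
import Mathlib
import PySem

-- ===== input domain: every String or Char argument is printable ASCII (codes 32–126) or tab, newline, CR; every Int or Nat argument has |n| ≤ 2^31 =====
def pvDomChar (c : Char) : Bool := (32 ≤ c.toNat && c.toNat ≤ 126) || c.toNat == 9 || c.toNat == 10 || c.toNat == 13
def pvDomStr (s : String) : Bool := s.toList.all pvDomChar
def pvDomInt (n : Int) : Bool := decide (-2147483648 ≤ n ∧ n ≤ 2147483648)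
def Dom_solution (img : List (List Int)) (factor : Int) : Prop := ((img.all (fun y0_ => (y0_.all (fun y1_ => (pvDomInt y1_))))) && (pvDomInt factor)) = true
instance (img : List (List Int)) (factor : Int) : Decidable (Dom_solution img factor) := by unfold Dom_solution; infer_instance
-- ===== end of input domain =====

-- B assembles each expanded row once and appends `factor` independent copies of it, replacing A's
-- preallocated zero square filled cell by cell through four nested index loops (objective: simpler).

-- ===== PORT A =====
-- range(k) for an Int k is empty when k ≤ 0, which Int.toNat's clamping reproduces exactly.
-- img[i][j] is read as (img.getD i []).getD j 0; Python raises IndexError on a row shorter than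
-- len(img) (with factor > 0), and Pre_solution excludes exactly those inputs.
def solution (img : List (List Int)) (factor : Int) : List (List Int) :=
  let n := img.length
  let N : Nat := ((n : Int) * factor).toNat
  let result := List.replicate N (List.replicate N (0 : Int))
  (List.range n).foldl (fun res i =>
    (List.range n).foldl (fun res j =>
      (List.range factor.toNat).foldl (fun res a =>
        (List.range factor.toNat).foldl (fun res b =>
          res.modify (i * factor.toNat + a)
            (fun row => row.set (j * factor.toNat + b) ((img.getD i []).getD j 0))) res) res) res)
    result

-- ===== PORT B =====
-- 'expanded = [img[i][j] for j in range(n) for _ in range(factor)]' is the flatMap of replicates;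
-- 'for _ in range(factor): result.append(list(expanded))' appends factor copies of that row.
def solution_alt (img : List (List Int)) (factor : Int) : List (List Int) :=
  let n := img.length
  (List.range n).foldl (fun result i =>
    let expanded := (List.range n).flatMap
      (fun j => List.replicate factor.toNat ((img.getD i []).getD j 0))
    result ++ List.replicate factor.toNat expanded) []

-- ===== PRECONDITION & SPEC =====
-- Pre_ excludes exactly the inputs where Python A raises IndexError: factor > 0 together with some
-- row shorter than len(img) (img[i][j] is then out of range). B raises there too.
def Pre_solution (img : List (List Int)) (factor : Int) : Prop :=
  factor ≤ 0 ∨ ∀ row ∈ img, img.length ≤ row.length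
instance (img : List (List Int)) (factor : Int) : Decidable (Pre_solution img factor) := by
  unfold Pre_solution; infer_instance

def pvWitness_solution : List (List Int) × Int := ([[1, 2], [3, 4]], 2)

def Spec_solution (img : List (List Int)) (factor : Int) (out : List (List Int)) : Prop := out = solution_alt img factor
instance (img : List (List Int)) (factor : Int) (out : List (List Int)) : Decidable (Spec_solution img factor out) := by unfold Spec_solution; infer_instance

-- ===== CLAIM (what is proved, stated in full; the proofs are below) =====
def Claim_equal_solution : Prop := ∀ (img : List (List Int)) (factor : Int), Dom_solution img factor → Pre_solution img factor → Spec_solution img factor (solution img factor)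

-- ===== LEMMAS AND PROOFS =====

/-- Canonical form of an N×N matrix given by an entry function. -/
def canon (N : Nat) (g : Nat → Nat → Int) : List (List Int) :=
  (List.range N).map fun r => (List.range N).map fun c => g r c

theorem foldl_const {α β : Type} (l : List β) (x : α) :
    l.foldl (fun r _ => r) x = x := by
  induction l generalizing x with
  | nil => rfl
  | cons a t ih => simp only [List.foldl_cons]; exact ih x

theorem canon_congr {N : Nat} {g g' : Nat → Nat → Int}
    (h : ∀ r < N, ∀ c < N, g r c = g' r c) : canon N g = canon N g' := by
  unfold canon
  refine List.map_congr_left (fun r hr => List.map_congr_left (fun c hc => ?_))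
  exact h r (List.mem_range.mp hr) c (List.mem_range.mp hc)

theorem map_range_set {N C : Nat} {v : Int} {h : Nat → Int} (hC : C < N) :
    ((List.range N).map h).set C v = (List.range N).map (fun c => if c = C then v else h c) := by
  apply List.ext_getElem?
  intro j
  rw [List.getElem?_set]
  by_cases hj : j < N
  · simp only [List.getElem?_map, List.getElem?_range hj, Option.map_some]
    by_cases hCj : C = j
    · subst hCj; simp [hC, List.length_range]
    · have h2 : ¬ j = C := fun h => hCj h.symm
      simp [hCj, h2]
  · have hN : N ≤ j := Nat.le_of_not_lt hj
    have h1 : (((List.range N).map h).length ≤ j) := by simpa using hN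
    have h2 : (((List.range N).map (fun c => if c = C then v else h c)).length ≤ j) := by
      simpa using hN
    rw [List.getElem?_eq_none h1, List.getElem?_eq_none h2]
    have : ¬ C = j := by omega
    simp [this]

theorem map_range_modify {N R : Nat} {F : List Int → List Int} {H : Nat → List Int} :
    ((List.range N).map H).modify R F
      = (List.range N).map (fun r => if r = R then F (H r) else H r) := by
  apply List.ext_getElem?
  intro j
  rw [List.getElem?_modify]
  by_cases hj : j < N
  · simp only [List.getElem?_map, List.getElem?_range hj, Option.map_some]
    by_cases hRj : R = j
    · subst hRj; simp
    · have h2 : ¬ j = R := fun h => hRj h.symm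
      simp [hRj, h2]
  · have hN : N ≤ j := Nat.le_of_not_lt hj
    rw [List.getElem?_eq_none (by simpa using hN), List.getElem?_eq_none (by simpa using hN)]
    simp

theorem canon_modify {N R C : Nat} {v : Int} {g : Nat → Nat → Int} (hC : C < N) :
    (canon N g).modify R (fun row => row.set C v)
      = canon N (fun r c => if r = R ∧ c = C then v else g r c) := by
  unfold canon
  rw [map_range_modify]
  refine List.map_congr_left (fun r hr => ?_)
  by_cases hrR : r = R
  · subst hrR
    rw [if_pos rfl, map_range_set hC]
    exact List.map_congr_left (fun c _ => by by_cases hc : c = C <;> simp [hc])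
  · rw [if_neg hrR]
    exact (List.map_congr_left (fun c _ => by simp [hrR])).symm

-- innermost loop (over b): fills one row segment [j*f, j*f+k) of row R with v
theorem bfold {n f : Nat} {v : Int} {R j : Nat} (_hR : R < n * f) (hj : j < n)
    (k : Nat) (hk : k ≤ f) (g : Nat → Nat → Int) :
    (List.range k).foldl (fun res b => res.modify R (fun row => row.set (j * f + b) v))
        (canon (n * f) g)
      = canon (n * f) (fun r c => if r = R ∧ j * f ≤ c ∧ c < j * f + k then v else g r c) := by
  induction k generalizing g with
  | zero =>
    simp only [List.range_zero, List.foldl_nil]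
    exact canon_congr (fun r _ c _ => by
      have : ¬ (r = R ∧ j * f ≤ c ∧ c < j * f + 0) := by omega
      rw [if_neg this])
  | succ k ih =>
    have hk' : k ≤ f := by omega
    have hjf : (j + 1) * f ≤ n * f := Nat.mul_le_mul_right f (by omega)
    have hsm : (j + 1) * f = j * f + f := by rw [Nat.succ_mul]
    have hC : j * f + k < n * f := by omega
    rw [List.range_succ, List.foldl_append, List.foldl_cons, List.foldl_nil,
      ih hk' g, canon_modify hC]
    exact canon_congr (fun r _ c _ => by split_ifs <;> first | rfl | omega)

-- loop over a: fills the block rows [R₀, R₀+k) × cols [j*f, j*f+f) with v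
theorem afold {n f : Nat} {v : Int} {i j : Nat} (hi : i < n) (hj : j < n)
    (k : Nat) (hk : k ≤ f) (g : Nat → Nat → Int) :
    (List.range k).foldl (fun res a =>
        (List.range f).foldl (fun res b =>
          res.modify (i * f + a) (fun row => row.set (j * f + b) v)) res)
        (canon (n * f) g)
      = canon (n * f) (fun r c =>
          if (i * f ≤ r ∧ r < i * f + k) ∧ j * f ≤ c ∧ c < j * f + f then v else g r c) := by
  induction k generalizing g with
  | zero =>
    simp only [List.range_zero, List.foldl_nil]
    exact canon_congr (fun r _ c _ => by
      have : ¬ ((i * f ≤ r ∧ r < i * f + 0) ∧ j * f ≤ c ∧ c < j * f + f) := by omega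
      rw [if_neg this])
  | succ k ih =>
    have hk' : k ≤ f := by omega
    have hif : (i + 1) * f ≤ n * f := Nat.mul_le_mul_right f (by omega)
    have hsm : (i + 1) * f = i * f + f := by rw [Nat.succ_mul]
    have hR : i * f + k < n * f := by omega
    rw [List.range_succ, List.foldl_append, List.foldl_cons, List.foldl_nil,
      ih hk' g, bfold hR hj f (le_refl f)]
    exact canon_congr (fun r _ c _ => by split_ifs <;> first | rfl | omega)

-- loop over j: fills rows [i*f, i*f+f) × cols [0, k*f) with the expanded pixels of image row i
theorem jfold {n f : Nat} {G : Nat → Nat → Int} {i : Nat} (hi : i < n)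
    (k : Nat) (hk : k ≤ n) (g : Nat → Nat → Int) :
    (List.range k).foldl (fun res j =>
        (List.range f).foldl (fun res a =>
          (List.range f).foldl (fun res b =>
            res.modify (i * f + a) (fun row => row.set (j * f + b) (G i j))) res) res)
        (canon (n * f) g)
      = canon (n * f) (fun r c =>
          if (i * f ≤ r ∧ r < i * f + f) ∧ c < k * f then G i (c / f) else g r c) := by
  induction k generalizing g with
  | zero =>
    simp only [List.range_zero, List.foldl_nil]
    exact canon_congr (fun r _ c _ => by
      have : ¬ ((i * f ≤ r ∧ r < i * f + f) ∧ c < 0 * f) := by omega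
      rw [if_neg this])
  | succ k ih =>
    have hk' : k ≤ n := by omega
    have hsm : (k + 1) * f = k * f + f := by rw [Nat.succ_mul]
    rw [List.range_succ, List.foldl_append, List.foldl_cons, List.foldl_nil,
      ih hk' g, afold hi (show k < n by omega) f (le_refl f)]
    refine canon_congr (fun r _ c _ => ?_)
    have hdiv : k * f ≤ c → c < k * f + f → c / f = k := fun h1 h2 =>
      Nat.div_eq_of_lt_le h1 (by omega)
    split_ifs with h1 h2
    · rw [hdiv (by omega) (by omega)]
    · omega
    · rfl
    · omega
    · omega
    · rfl

-- loop over i: fills rows [0, k*f) × cols [0, n*f) with the upscaled image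
theorem ifold {n f : Nat} {G : Nat → Nat → Int}
    (k : Nat) (hk : k ≤ n) (g : Nat → Nat → Int) :
    (List.range k).foldl (fun res i =>
        (List.range n).foldl (fun res j =>
          (List.range f).foldl (fun res a =>
            (List.range f).foldl (fun res b =>
              res.modify (i * f + a) (fun row => row.set (j * f + b) (G i j))) res) res) res)
        (canon (n * f) g)
      = canon (n * f) (fun r c =>
          if r < k * f ∧ c < n * f then G (r / f) (c / f) else g r c) := by
  induction k generalizing g with
  | zero =>
    simp only [List.range_zero, List.foldl_nil]
    exact canon_congr (fun r _ c _ => by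
      have : ¬ (r < 0 * f ∧ c < n * f) := by omega
      rw [if_neg this])
  | succ k ih =>
    have hk' : k ≤ n := by omega
    have hsm : (k + 1) * f = k * f + f := by rw [Nat.succ_mul]
    rw [List.range_succ, List.foldl_append, List.foldl_cons, List.foldl_nil,
      ih hk' g, jfold (by omega : k < n) n (le_refl n)]
    refine canon_congr (fun r _ c _ => ?_)
    have hdiv : k * f ≤ r → r < k * f + f → r / f = k := fun h1 h2 =>
      Nat.div_eq_of_lt_le h1 (by omega)
    split_ifs with h1 h2
    · rw [hdiv (by omega) (by omega)]
    · omega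
    · rfl
    · omega
    · omega
    · rfl

-- replicate-flatMap over range m in closed map form
theorem flatMap_replicate_eq_map {α : Type} {f : Nat} (m : Nat) (h : Nat → α) :
    (List.range m).flatMap (fun i => List.replicate f (h i))
      = (List.range (m * f)).map (fun r => h (r / f)) := by
  induction m with
  | zero => simp
  | succ m ih =>
    have hsm : (m + 1) * f = m * f + f := by rw [Nat.succ_mul]
    rw [List.range_succ, List.flatMap_append, ih, hsm, List.range_add, List.map_append,
      List.map_map]
    have : (List.range f).map ((fun r => h (r / f)) ∘ fun x => m * f + x)
        = (List.range f).map (fun _ => h m) := by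
      refine List.map_congr_left (fun x hx => ?_)
      have hx' : x < f := List.mem_range.mp hx
      simp only [Function.comp]
      have hd : (m * f + x) / f = m :=
        Nat.div_eq_of_lt_le (by omega) (by rw [Nat.succ_mul]; omega)
      rw [hd]
    rw [this, List.map_const', List.length_range]
    simp

theorem canon_zero (N : Nat) :
    List.replicate N (List.replicate N (0 : Int)) = canon N (fun _ _ => 0) := by
  unfold canon
  rw [List.map_const', List.length_range, List.map_const', List.length_range]

theorem solution_alt_canon (img : List (List Int)) (factor : Int) :
    solution_alt img factor
      = canon (img.length * factor.toNat)
          (fun r c => (img.getD (r / factor.toNat) []).getD (c / factor.toNat) 0) := by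
  unfold solution_alt canon
  rw [PySem.List.foldl_append_eq_flatMap, List.nil_append,
    flatMap_replicate_eq_map img.length]
  refine List.map_congr_left (fun r _ => ?_)
  exact flatMap_replicate_eq_map img.length _

theorem toNat_mul_pos {n : Nat} {factor : Int} (hf : 0 < factor) :
    ((n : Int) * factor).toNat = n * factor.toNat := by
  have h : factor = (factor.toNat : Int) := by omega
  rw [h]
  exact Int.toNat_natCast _

-- ===== VERDICT (by name: the statement is the Claim_ definition above) =====
theorem solution_spec : Claim_equal_solution := by
  intro img factor _ _
  unfold Spec_solution
  by_cases hf : factor ≤ 0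
  · have h0 : factor.toNat = 0 := by omega
    have hN : ((img.length : Int) * factor).toNat = 0 := by
      have h1 : (img.length : Int) * factor ≤ 0 :=
        mul_nonpos_of_nonneg_of_nonpos (Int.natCast_nonneg _) hf
      omega
    unfold solution solution_alt
    simp only [h0, hN, List.range_zero, List.foldl_nil, List.replicate_zero,
      List.flatMap, List.append_nil, foldl_const]
  · have hfpos : 0 < factor := by omega
    unfold solution
    simp only
    rw [toNat_mul_pos hfpos, canon_zero,
      ifold img.length (le_refl img.length) (fun _ _ => 0),
      solution_alt_canon img factor]
    exact canon_congr (fun r hr c hc => by rw [if_pos ⟨hr, hc⟩])
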